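-- pv_equiv track=rewrite | github.com/xixi16/LcdPngGenerator | python/PyIdToLcdPng.py | convertToLcdPartern
-- ===== SOURCE A (Python) =====
-- char_to_number = {
--     '0': 0x77,
--     '1': 0x42,
--     '2': 0xB6,
--     '3': 0xD6,
--     '4': 0xC3,
--     '5': 0xD5,
--     '6': 0xF5,
--     '7': 0x46,
--     '8': 0xF7,
--     '9': 0xD7,
-- }
--
-- def convertToLcdPartern(idWithChecksum_str):
--     """
--     The function takes a string as input and converts it to a number by mapping each character to a
--     corresponding number and combining them using bitwise operations.
--
--     :param idWithChecksum_str: The parameter `idWithChecksum_str` is a string that represents an ID with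
--     a checksum
--     :return: the result_number, which is an integer value.
--     """
--     result_number = 0
--     for char in idWithChecksum_str:
--         if char in char_to_number:
--             result_number = (result_number << 8) | char_to_number[char]
--         else:
--             return 0
--     return result_number
-- ===== SOURCE B (Python) =====
-- char_to_number = {
--     '0': 0x77,
--     '1': 0x42,
--     '2': 0xB6,
--     '3': 0xD6,
--     '4': 0xC3,
--     '5': 0xD5,
--     '6': 0xF5,
--     '7': 0x46,
--     '8': 0xF7,
--     '9': 0xD7,
-- }
--
-- def convertToLcdPartern(idWithChecksum_str):
--     # Stage 1: validate the whole string up front; any unknown char means 0.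
--     if not all(c in char_to_number for c in idWithChecksum_str):
--         return 0
--     # Stage 2: positional sum right-to-left; each byte carries weight 256^position.
--     total = 0
--     weight = 1
--     for c in reversed(idWithChecksum_str):
--         total += char_to_number[c] * weight
--         weight *= 256
--     return total
-- ===== Notes on version B (the rewrite author's own statement) =====
-- stated objective: alternative
-- what changed: B replaces A's single left-to-right shift-or fold with two staged passes: a whole-string validation pass (no early return inside the packing loop), then a right-to-left traversal summing char_to_number[c] * 256^position with a multiplicative weight accumulator instead of bit operations.
import Mathlib
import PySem

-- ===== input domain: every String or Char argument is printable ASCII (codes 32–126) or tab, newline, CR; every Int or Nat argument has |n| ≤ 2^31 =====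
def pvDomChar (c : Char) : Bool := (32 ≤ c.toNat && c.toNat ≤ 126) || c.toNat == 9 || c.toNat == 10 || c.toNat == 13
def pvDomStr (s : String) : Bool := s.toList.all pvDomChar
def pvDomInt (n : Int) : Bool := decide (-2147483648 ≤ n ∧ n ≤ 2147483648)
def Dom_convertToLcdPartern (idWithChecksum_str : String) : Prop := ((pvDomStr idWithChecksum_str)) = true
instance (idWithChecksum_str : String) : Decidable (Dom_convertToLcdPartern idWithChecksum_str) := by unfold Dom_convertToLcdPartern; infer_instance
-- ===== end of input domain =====

-- B replaces A's left-to-right shift-or fold with a whole-string validation pass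
-- followed by a right-to-left positional weighted sum (objective: alternative);
-- return values proved equal.

-- shared module constant char_to_number
def charToNumber : PySem.Dict Char Int :=
  PySem.Dict.mk [('0', 0x77), ('1', 0x42), ('2', 0xB6), ('3', 0xD6), ('4', 0xC3),
                     ('5', 0xD5), ('6', 0xF5), ('7', 0x46), ('8', 0xF7), ('9', 0xD7)]

-- ===== PORT A =====
-- the for-loop with its early `return 0`, shift-or accumulator carried along
def convertA_go (cs : List Char) (result_number : Int) : Int :=
  match cs with
  | [] => result_number
  | c :: rest =>
    if charToNumber.contains c then
      match charToNumber.get? c with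
      | some v => convertA_go rest (PySem.Int.bor (result_number <<< 8) v)
      | none => 0   -- unreachable: contains holds
    else 0

def convertToLcdPartern (idWithChecksum_str : String) : Int :=
  convertA_go idWithChecksum_str.toList 0

-- ===== PORT B =====
-- stage 2: the loop over reversed(s) with total/weight accumulators
def convertB_loop (rs : List Char) (total weight : Int) : Int :=
  match rs with
  | [] => total
  -- char_to_number[c]: the key is present (stage 1 guarantees it), ported as getD 0
  | c :: rest => convertB_loop rest (total + (charToNumber.get? c).getD 0 * weight) (weight * 256)

def convertToLcdPartern_alt (idWithChecksum_str : String) : Int :=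
  -- stage 1: all(c in char_to_number for c in s)
  if idWithChecksum_str.toList.all (fun c => charToNumber.contains c) then
    convertB_loop idWithChecksum_str.toList.reverse 0 1
  else 0

-- ===== PRECONDITION & SPEC =====
def Spec_convertToLcdPartern (idWithChecksum_str : String) (out : Int) : Prop := out = convertToLcdPartern_alt idWithChecksum_str
instance (idWithChecksum_str : String) (out : Int) : Decidable (Spec_convertToLcdPartern idWithChecksum_str out) := by unfold Spec_convertToLcdPartern; infer_instance

-- ===== CLAIM =====
def Claim_equal_convertToLcdPartern : Prop := ∀ (idWithChecksum_str : String), Dom_convertToLcdPartern idWithChecksum_str → Spec_convertToLcdPartern idWithChecksum_str (convertToLcdPartern idWithChecksum_str)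

-- ===== LEMMAS AND PROOFS =====

-- the looked-up byte of a char (0 if absent)
def cVal (c : Char) : Int := (charToNumber.get? c).getD 0

-- little-endian horner value of a char list (head = lowest byte)
def hLE (cs : List Char) : Int :=
  match cs with
  | [] => 0
  | c :: rest => cVal c + 256 * hLE rest

theorem nat_shiftLeft_or (x y : Nat) (h : y < 2 ^ 8) : x <<< 8 ||| y = 2 ^ 8 * x + y := by
  apply Nat.eq_of_testBit_eq
  intro i
  rw [Nat.testBit_lor, Nat.testBit_two_pow_mul_add x h i, Nat.testBit_shiftLeft]
  rcases Nat.lt_or_ge i 8 with hi | hi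
  · simp [hi, Nat.not_le.mpr hi]
  · simp [hi, Nat.not_lt.mpr hi,
      Nat.testBit_lt_two_pow (Nat.lt_of_lt_of_le h (Nat.pow_le_pow_right (by norm_num) hi))]

-- Python's (a << 8) | v on nonnegatives equals a*256 + v
theorem shiftor_eq (a v : Int) (ha : 0 ≤ a) (hv0 : 0 ≤ v) (hv : v < 256) :
    PySem.Int.bor (a <<< 8) v = a * 256 + v := by
  obtain ⟨x, rfl⟩ := Int.eq_ofNat_of_zero_le ha
  obtain ⟨y, rfl⟩ := Int.eq_ofNat_of_zero_le hv0
  have hy : y < 2 ^ 8 := by exact_mod_cast hv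
  have hsh : ((x : Int) <<< 8) = ((x <<< 8 : Nat) : Int) := (Int.natCast_shiftLeft x 8).symm
  rw [hsh, PySem.Int.bor_natCast, nat_shiftLeft_or x y hy]
  push_cast; ring

-- lookups in charToNumber are bytes
theorem charToNumber_val_bounds (c : Char) (v : Int) (h : charToNumber.get? c = some v) :
    0 ≤ v ∧ v < 256 := by
  simp only [charToNumber, PySem.Dict.get?_mk_cons] at h
  split_ifs at h <;> simp only [Option.some.injEq, PySem.Dict.get?] at h <;> first | omega | simp_all

theorem cVal_bounds (c : Char) : 0 ≤ cVal c ∧ cVal c < 256 := by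
  unfold cVal
  cases h : charToNumber.get? c with
  | none => simp
  | some v => simpa using charToNumber_val_bounds c v h

-- A's loop, when every char is in the table, is the big-endian horner fold
theorem convertA_go_valid (cs : List Char) (a : Int) (ha : 0 ≤ a)
    (hall : ∀ c ∈ cs, charToNumber.contains c = true) :
    convertA_go cs a = cs.foldl (fun a c => a * 256 + cVal c) a := by
  induction cs generalizing a with
  | nil => simp [convertA_go]
  | cons c rest ih =>
    have hc := hall c (List.mem_cons_self ..)
    rw [convertA_go]
    cases hg : charToNumber.get? c with
    | none =>
      rw [PySem.Dict.get?_eq_none_iff_contains] at hg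
      simp [hg] at hc
    | some v =>
      obtain ⟨hv0, hv⟩ := charToNumber_val_bounds c v hg
      simp only [hc, if_true, List.foldl_cons]
      rw [shiftor_eq a v ha hv0 hv]
      have : cVal c = v := by simp [cVal, hg]
      rw [← this] at *
      exact ih (a * 256 + cVal c) (by nlinarith [cVal_bounds c]) (fun d hd => hall d (List.mem_cons_of_mem _ hd))
  
-- A's loop returns 0 as soon as an invalid char is present
theorem convertA_go_invalid (cs : List Char) (a : Int)
    (h : ¬ ∀ c ∈ cs, charToNumber.contains c = true) :
    convertA_go cs a = 0 := by
  induction cs generalizing a with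
  | nil => exact absurd (by simp) h
  | cons c rest ih =>
    rw [convertA_go]
    by_cases hc : charToNumber.contains c = true
    · cases hg : charToNumber.get? c with
      | none => simp
      | some v =>
        simp only [hc, if_true]
        exact ih _ (fun hr => h (by simpa [hc] using hr))
    · simp [hc]

-- appending a char at the end adds its byte at the top weight
theorem hLE_append (l : List Char) (c : Char) :
    hLE (l ++ [c]) = hLE l + 256 ^ l.length * cVal c := by
  induction l with
  | nil => simp [hLE]
  | cons d r ih => simp [hLE, ih]; ring

-- the big-endian fold equals a shifted by the length plus the little-endian value of the reverse
theorem foldl_eq_hLE_reverse (cs : List Char) (a : Int) :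
    cs.foldl (fun a c => a * 256 + cVal c) a = a * 256 ^ cs.length + hLE cs.reverse := by
  induction cs generalizing a with
  | nil => simp [hLE]
  | cons c rest ih =>
    simp only [List.foldl_cons, List.reverse_cons, List.length_cons]
    rw [ih, hLE_append]
    simp [List.length_reverse]
    ring

-- B's loop computes total + weight * (little-endian value of the remaining list)
theorem convertB_loop_eq (rs : List Char) (t w : Int) :
    convertB_loop rs t w = t + w * hLE rs := by
  induction rs generalizing t w with
  | nil => simp [convertB_loop, hLE]
  | cons c rest ih =>
    rw [convertB_loop, ih, hLE]
    show t + cVal c * w + w * 256 * hLE rest = _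
    ring

-- ===== VERDICT =====
theorem convertToLcdPartern_spec : Claim_equal_convertToLcdPartern := by
  intro s _
  unfold Spec_convertToLcdPartern convertToLcdPartern convertToLcdPartern_alt
  by_cases hall : ∀ c ∈ s.toList, charToNumber.contains c = true
  · rw [if_pos (by simpa [List.all_eq_true] using hall)]
    rw [convertA_go_valid s.toList 0 le_rfl hall, foldl_eq_hLE_reverse, convertB_loop_eq]
    ring
  · rw [if_neg (by simpa [List.all_eq_true] using hall)]
    exact convertA_go_invalid s.toList 0 hall
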